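-- pv_equiv track=rewrite | github.com/dnidhi2710/Morphology-image-segementation-and-Hough-Transform | Key_point_detection.py | calculate_keypoints
-- ===== SOURCE A (Python) =====
-- def initialise_matrix(row, col):
--     matrix = [[0 for x in range(col)] for y in range(row)]
--     return matrix
--
-- def get_3_cross3(matrix, row, col):
--     MAT = initialise_matrix(3, 3)
--     if row == 0 or col == 0:
--         MAT[0][0] = 0
--     else:
--         MAT[0][0] = matrix[row-1][col-1]
--
--     if row == 0:
--         MAT[0][1] = 0
--     else:
--         MAT[0][1] = matrix[row-1][col]
--
--     if row == 0 or col == len(matrix[0])-1: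
--         MAT[0][2] = 0
--     else:
--         MAT[0][2] = matrix[row-1][col+1]
--
--     if col == 0:
--         MAT[1][0] = 0
--     else:
--         MAT[1][0] = matrix[row][col-1]
--
--     MAT[1][1] = matrix[row][col]
--
--     if col == len(matrix[0])-1:
--         MAT[1][2] = 0
--     else:
--         MAT[1][2] = matrix[row][col+1]
--
--     if row == len(matrix)-1 or col == 0:
--         MAT[2][0] = 0
--     else:
--         MAT[2][0] = matrix[row+1][col-1]
--
--     if row == len(matrix)-1:
--         MAT[2][1] = 0
--     else:
--         MAT[2][1] = matrix[row+1][col]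
--
--     if row == len(matrix)-1 or col == len(matrix[0])-1:
--         MAT[2][2] = 0
--     else:
--         MAT[2][2] = matrix[row+1][col+1]
--
--     return MAT
--
-- def getKeyPoint(Mat1,Mat2,Mat3,Value):
--     row = len(Mat1)
--     col = len(Mat1[0])
--     complete_list = []
--     for i in range(row):
--         for j in range(col):
--             complete_list.append(Mat1[i][j])
--             complete_list.append(Mat2[i][j])
--             complete_list.append(Mat3[i][j])
--
--     max_value = max(complete_list)
--     min_value = min(complete_list)
--
--     if Value == max_value or Value == min_value:
--         return Value
--     else:
--         return 0
--
-- def calculate_keypoints(Mat1,Mat2,Mat3):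
--     row = len(Mat1)
--     col = len(Mat1[0])
--     op = initialise_matrix(row,col)
--     for i in range(row):
--         for j in range(col):
--             Pix1 =  get_3_cross3(Mat1,i,j)
--             Pix2 =  get_3_cross3(Mat2,i,j)
--             Pix3 =  get_3_cross3(Mat3,i,j)
--             op[i][j] = getKeyPoint(Pix1,Pix2,Pix3,Mat2[i][j])
--
--     return op
-- ===== SOURCE B (Python) =====
-- def _nbr(m, r, c, i, j):
--     return m[i][j] if 0 <= i < r and 0 <= j < c else 0
--
-- def _winmax(m, r, c, i, j):
--     return max(
--         _nbr(m, r, c, i - 1, j - 1), _nbr(m, r, c, i - 1, j), _nbr(m, r, c, i - 1, j + 1),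
--         _nbr(m, r, c, i, j - 1), _nbr(m, r, c, i, j), _nbr(m, r, c, i, j + 1),
--         _nbr(m, r, c, i + 1, j - 1), _nbr(m, r, c, i + 1, j), _nbr(m, r, c, i + 1, j + 1))
--
-- def _winmin(m, r, c, i, j):
--     return min(
--         _nbr(m, r, c, i - 1, j - 1), _nbr(m, r, c, i - 1, j), _nbr(m, r, c, i - 1, j + 1),
--         _nbr(m, r, c, i, j - 1), _nbr(m, r, c, i, j), _nbr(m, r, c, i, j + 1),
--         _nbr(m, r, c, i + 1, j - 1), _nbr(m, r, c, i + 1, j), _nbr(m, r, c, i + 1, j + 1))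
--
-- def _table(win, m, r, c):
--     return [[win(m, r, c, i, j) for j in range(c)] for i in range(r)]
--
-- def calculate_keypoints(Mat1, Mat2, Mat3):
--     r = len(Mat1)
--     c = len(Mat1[0])
--     mx1 = _table(_winmax, Mat1, r, c)
--     mx2 = _table(_winmax, Mat2, r, c)
--     mx3 = _table(_winmax, Mat3, r, c)
--     mn1 = _table(_winmin, Mat1, r, c)
--     mn2 = _table(_winmin, Mat2, r, c)
--     mn3 = _table(_winmin, Mat3, r, c)
--     out = []
--     for i in range(r):
--         row = []
--         for j in range(c):
--             combined_max = max(mx1[i][j], mx2[i][j], mx3[i][j])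
--             combined_min = min(mn1[i][j], mn2[i][j], mn3[i][j])
--             v = Mat2[i][j]
--             row.append(v if v == combined_max or v == combined_min else 0)
--         out.append(row)
--     return out
-- ===== Notes on version B (the rewrite author's own statement) =====
-- stated objective: alternative
-- what changed: Replaces A's per-pixel construction of three 3x3 window matrices and a 27-element list fed to max/min with six precomputed windowed-max/windowed-min tables (3x3 dilation/erosion with 0-padding) that a separate second pass combines elementwise and compares against Mat2[i][j].
-- outside the precondition, e.g. on calculate_keypoints([[1]], [[5, 9]], [[1]]): A returns [[0]], B returns [[5]]; on calculate_keypoints([[1]], [[2, 9]], [[3]]): A returns [[0]], B returns [[0]]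
import Mathlib
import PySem

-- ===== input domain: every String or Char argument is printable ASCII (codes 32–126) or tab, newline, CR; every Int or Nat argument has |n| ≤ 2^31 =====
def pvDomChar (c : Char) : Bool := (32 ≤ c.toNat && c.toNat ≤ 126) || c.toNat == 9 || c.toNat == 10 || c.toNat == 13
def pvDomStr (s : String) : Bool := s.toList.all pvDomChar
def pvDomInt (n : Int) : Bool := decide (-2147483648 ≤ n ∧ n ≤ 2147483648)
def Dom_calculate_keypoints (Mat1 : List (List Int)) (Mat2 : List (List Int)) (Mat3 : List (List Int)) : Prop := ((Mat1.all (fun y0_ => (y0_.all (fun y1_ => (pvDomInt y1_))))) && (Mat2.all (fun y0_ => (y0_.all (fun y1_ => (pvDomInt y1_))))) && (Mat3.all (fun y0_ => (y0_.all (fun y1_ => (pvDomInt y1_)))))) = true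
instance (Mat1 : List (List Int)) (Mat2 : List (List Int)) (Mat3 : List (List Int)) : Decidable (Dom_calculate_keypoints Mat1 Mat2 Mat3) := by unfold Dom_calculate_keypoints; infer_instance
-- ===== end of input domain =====

-- B recomputes the same keypoint map from six precomputed 3x3 windowed-max/min tables combined
-- elementwise, instead of A's per-pixel window matrices and 27-element list (objective: alternative).

-- ===== PORT A =====
-- shared 2-D indexing helper: m[i][j] (both Pythons index matrices this way; in range under Pre_)
def pvCell (m : List (List Int)) (i j : Int) : Int :=
  PySem.List.pyGetD (PySem.List.pyGetD m i []) j 0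

-- get_3_cross3: MAT = initialise_matrix(3,3) followed by one assignment per slot is ported as the
-- resulting 3x3 literal (every slot is written exactly once, in this order).
def get_3_cross3 (matrix : List (List Int)) (row col : Int) : List (List Int) :=
  [[if row = 0 ∨ col = 0 then 0 else pvCell matrix (row - 1) (col - 1),
    if row = 0 then 0 else pvCell matrix (row - 1) col,
    if row = 0 ∨ col = ((PySem.List.pyGetD matrix 0 []).length : Int) - 1 then 0 else pvCell matrix (row - 1) (col + 1)],
   [if col = 0 then 0 else pvCell matrix row (col - 1),
    pvCell matrix row col,
    if col = ((PySem.List.pyGetD matrix 0 []).length : Int) - 1 then 0 else pvCell matrix row (col + 1)],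
   [if row = (matrix.length : Int) - 1 ∨ col = 0 then 0 else pvCell matrix (row + 1) (col - 1),
    if row = (matrix.length : Int) - 1 then 0 else pvCell matrix (row + 1) col,
    if row = (matrix.length : Int) - 1 ∨ col = ((PySem.List.pyGetD matrix 0 []).length : Int) - 1 then 0 else pvCell matrix (row + 1) (col + 1)]]

def getKeyPoint (M1 M2 M3 : List (List Int)) (Value : Int) : Int :=
  let row : Int := M1.length
  let col : Int := (PySem.List.pyGetD M1 0 []).length
  let complete_list : List Int :=
    (PySem.List.pyRange 0 row 1).foldl (fun acc i =>
      (PySem.List.pyRange 0 col 1).foldl (fun acc j =>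
        ((acc ++ [pvCell M1 i j]) ++ [pvCell M2 i j]) ++ [pvCell M3 i j]) acc) []
  -- max(list)/min(list); complete_list is nonempty at every call site (3x3 windows)
  let max_value : Int := (PySem.List.max? complete_list (fun x => x)).getD 0
  let min_value : Int := (PySem.List.min? complete_list (fun x => x)).getD 0
  if Value = max_value ∨ Value = min_value then Value else 0

def calculate_keypoints (Mat1 : List (List Int)) (Mat2 : List (List Int)) (Mat3 : List (List Int)) : List (List Int) :=
  let row : Int := Mat1.length
  let col : Int := (PySem.List.pyGetD Mat1 0 []).length
  -- op = initialise_matrix(row, col) with op[i][j] assigned once per cell, in order: ported as the direct construction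
  (PySem.List.pyRange 0 row 1).map (fun i =>
    (PySem.List.pyRange 0 col 1).map (fun j =>
      getKeyPoint (get_3_cross3 Mat1 i j) (get_3_cross3 Mat2 i j) (get_3_cross3 Mat3 i j) (pvCell Mat2 i j)))

-- ===== PORT B =====
def pvNbr (m : List (List Int)) (r c i j : Int) : Int :=
  if 0 ≤ i ∧ i < r ∧ 0 ≤ j ∧ j < c then pvCell m i j else 0

-- max(...)/min(...) over nine arguments is ported as left-nested binary max/min
def pvWinMax (m : List (List Int)) (r c i j : Int) : Int :=
  max (max (max (max (max (max (max (max
    (pvNbr m r c (i - 1) (j - 1)) (pvNbr m r c (i - 1) j)) (pvNbr m r c (i - 1) (j + 1)))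
    (pvNbr m r c i (j - 1))) (pvNbr m r c i j)) (pvNbr m r c i (j + 1)))
    (pvNbr m r c (i + 1) (j - 1))) (pvNbr m r c (i + 1) j)) (pvNbr m r c (i + 1) (j + 1))

def pvWinMin (m : List (List Int)) (r c i j : Int) : Int :=
  min (min (min (min (min (min (min (min
    (pvNbr m r c (i - 1) (j - 1)) (pvNbr m r c (i - 1) j)) (pvNbr m r c (i - 1) (j + 1)))
    (pvNbr m r c i (j - 1))) (pvNbr m r c i j)) (pvNbr m r c i (j + 1)))
    (pvNbr m r c (i + 1) (j - 1))) (pvNbr m r c (i + 1) j)) (pvNbr m r c (i + 1) (j + 1))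

def pvTable (win : List (List Int) → Int → Int → Int → Int → Int) (m : List (List Int)) (r c : Int) : List (List Int) :=
  (PySem.List.pyRange 0 r 1).map (fun i => (PySem.List.pyRange 0 c 1).map (fun j => win m r c i j))

def calculate_keypoints_alt (Mat1 : List (List Int)) (Mat2 : List (List Int)) (Mat3 : List (List Int)) : List (List Int) :=
  let r : Int := Mat1.length
  let c : Int := (PySem.List.pyGetD Mat1 0 []).length
  let mx1 := pvTable pvWinMax Mat1 r c
  let mx2 := pvTable pvWinMax Mat2 r c
  let mx3 := pvTable pvWinMax Mat3 r c
  let mn1 := pvTable pvWinMin Mat1 r c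
  let mn2 := pvTable pvWinMin Mat2 r c
  let mn3 := pvTable pvWinMin Mat3 r c
  (PySem.List.pyRange 0 r 1).map (fun i =>
    (PySem.List.pyRange 0 c 1).map (fun j =>
      let combined_max := max (max (pvCell mx1 i j) (pvCell mx2 i j)) (pvCell mx3 i j)
      let combined_min := min (min (pvCell mn1 i j) (pvCell mn2 i j)) (pvCell mn3 i j)
      let v := pvCell Mat2 i j
      if v = combined_max ∨ v = combined_min then v else 0))

-- ===== PRECONDITION & SPEC =====
-- Pre_ excludes empty Mat1 (A raises IndexError on len(Mat1[0])) and, when Mat1 has columns,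
-- matrices whose row count or row lengths differ from Mat1's shape: there A either raises
-- IndexError or keys each matrix's border geometry to its own mismatched first-row length,
-- an accident of get_3_cross3 (see the cited examples).
def Pre_calculate_keypoints (Mat1 : List (List Int)) (Mat2 : List (List Int)) (Mat3 : List (List Int)) : Prop :=
  Mat1 ≠ [] ∧
  ((PySem.List.pyGetD Mat1 0 []).length = 0 ∨
   (Mat2.length = Mat1.length ∧ Mat3.length = Mat1.length ∧
    (∀ row ∈ Mat1, row.length = (PySem.List.pyGetD Mat1 0 []).length) ∧
    (∀ row ∈ Mat2, row.length = (PySem.List.pyGetD Mat1 0 []).length) ∧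
    (∀ row ∈ Mat3, row.length = (PySem.List.pyGetD Mat1 0 []).length)))

instance (Mat1 : List (List Int)) (Mat2 : List (List Int)) (Mat3 : List (List Int)) : Decidable (Pre_calculate_keypoints Mat1 Mat2 Mat3) := by unfold Pre_calculate_keypoints; infer_instance

def pvWitness_calculate_keypoints : List (List Int) × List (List Int) × List (List Int) :=
  ([[1, 2], [3, 4]], [[5, 6], [7, 8]], [[0, 1], [2, 3]])

def Spec_calculate_keypoints (Mat1 : List (List Int)) (Mat2 : List (List Int)) (Mat3 : List (List Int)) (out : List (List Int)) : Prop := out = calculate_keypoints_alt Mat1 Mat2 Mat3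
instance (Mat1 : List (List Int)) (Mat2 : List (List Int)) (Mat3 : List (List Int)) (out : List (List Int)) : Decidable (Spec_calculate_keypoints Mat1 Mat2 Mat3 out) := by unfold Spec_calculate_keypoints; infer_instance

-- ===== CLAIM (what is proved, stated in full; the proofs are below) =====
def Claim_equal_calculate_keypoints : Prop := ∀ (Mat1 : List (List Int)) (Mat2 : List (List Int)) (Mat3 : List (List Int)), Dom_calculate_keypoints Mat1 Mat2 Mat3 → Pre_calculate_keypoints Mat1 Mat2 Mat3 → Spec_calculate_keypoints Mat1 Mat2 Mat3 (calculate_keypoints Mat1 Mat2 Mat3)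

-- ===== LEMMAS AND PROOFS =====

lemma pv_max_comb (a0 a1 a2 a3 a4 a5 a6 a7 a8 b0 b1 b2 b3 b4 b5 b6 b7 b8 c0 c1 c2 c3 c4 c5 c6 c7 c8 : Int) :
    max (max (max (max (max (max (max (max (max (max (max (max (max (max (max (max (max (max (max (max (max (max (max (max (max (max (a0) (b0)) (c0)) (a1)) (b1)) (c1)) (a2)) (b2)) (c2)) (a3)) (b3)) (c3)) (a4)) (b4)) (c4)) (a5)) (b5)) (c5)) (a6)) (b6)) (c6)) (a7)) (b7)) (c7)) (a8)) (b8)) (c8)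
    = max (max (max (max (max (max (max (max (max (max (a0) (a1)) (a2)) (a3)) (a4)) (a5)) (a6)) (a7)) (a8)) (max (max (max (max (max (max (max (max (b0) (b1)) (b2)) (b3)) (b4)) (b5)) (b6)) (b7)) (b8))) (max (max (max (max (max (max (max (max (c0) (c1)) (c2)) (c3)) (c4)) (c5)) (c6)) (c7)) (c8)) := by ac_rfl
lemma pv_min_comb (a0 a1 a2 a3 a4 a5 a6 a7 a8 b0 b1 b2 b3 b4 b5 b6 b7 b8 c0 c1 c2 c3 c4 c5 c6 c7 c8 : Int) :
    min (min (min (min (min (min (min (min (min (min (min (min (min (min (min (min (min (min (min (min (min (min (min (min (min (min (a0) (b0)) (c0)) (a1)) (b1)) (c1)) (a2)) (b2)) (c2)) (a3)) (b3)) (c3)) (a4)) (b4)) (c4)) (a5)) (b5)) (c5)) (a6)) (b6)) (c6)) (a7)) (b7)) (c7)) (a8)) (b8)) (c8)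
    = min (min (min (min (min (min (min (min (min (min (a0) (a1)) (a2)) (a3)) (a4)) (a5)) (a6)) (a7)) (a8)) (min (min (min (min (min (min (min (min (b0) (b1)) (b2)) (b3)) (b4)) (b5)) (b6)) (b7)) (b8))) (min (min (min (min (min (min (min (min (c0) (c1)) (c2)) (c3)) (c4)) (c5)) (c6)) (c7)) (c8)) := by ac_rfl


lemma pv_getKeyPoint_red (x0 x1 x2 x3 x4 x5 x6 x7 x8 y0 y1 y2 y3 y4 y5 y6 y7 y8 z0 z1 z2 z3 z4 z5 z6 z7 z8 V : Int) :
    getKeyPoint [[x0, x1, x2], [x3, x4, x5], [x6, x7, x8]]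
        [[y0, y1, y2], [y3, y4, y5], [y6, y7, y8]]
        [[z0, z1, z2], [z3, z4, z5], [z6, z7, z8]] V
    = (if V = max (max (max (max (max (max (max (max (max (max (max (max (max (max (max (max (max (max (max (max (max (max (max (max (max (max (x0) (y0)) (z0)) (x1)) (y1)) (z1)) (x2)) (y2)) (z2)) (x3)) (y3)) (z3)) (x4)) (y4)) (z4)) (x5)) (y5)) (z5)) (x6)) (y6)) (z6)) (x7)) (y7)) (z7)) (x8)) (y8)) (z8)
          ∨ V = min (min (min (min (min (min (min (min (min (min (min (min (min (min (min (min (min (min (min (min (min (min (min (min (min (min (x0) (y0)) (z0)) (x1)) (y1)) (z1)) (x2)) (y2)) (z2)) (x3)) (y3)) (z3)) (x4)) (y4)) (z4)) (x5)) (y5)) (z5)) (x6)) (y6)) (z6)) (x7)) (y7)) (z7)) (x8)) (y8)) (z8)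
        then V else 0) := by
  simp only [getKeyPoint, List.length_cons, List.length_nil, Nat.reduceAdd, Nat.cast_ofNat,
    PySem.List.pyGetD_zero_cons]
  rw [show PySem.List.pyRange 0 3 1 = [0, 1, 2] from by decide]
  simp only [List.append_assoc, List.cons_append, List.nil_append,
    PySem.List.foldl_append_eq_flatMap, List.flatMap_cons, List.flatMap_nil, List.append_nil]
  rw [PySem.List.max?_id_cons, PySem.List.min?_id_cons]
  rfl

lemma pv_g3_eq (m : List (List Int)) (r c i j : Int)
    (hr : (m.length : Int) = r) (hc : ((PySem.List.pyGetD m 0 []).length : Int) = c)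
    (hi0 : 0 ≤ i) (hir : i < r) (hj0 : 0 ≤ j) (hjc : j < c) :
    get_3_cross3 m i j =
      [[pvNbr m r c (i - 1) (j - 1), pvNbr m r c (i - 1) j, pvNbr m r c (i - 1) (j + 1)],
       [pvNbr m r c i (j - 1), pvNbr m r c i j, pvNbr m r c i (j + 1)],
       [pvNbr m r c (i + 1) (j - 1), pvNbr m r c (i + 1) j, pvNbr m r c (i + 1) (j + 1)]] := by
  unfold get_3_cross3 pvNbr
  rw [hr, hc]
  simp only [List.cons.injEq, and_true]
  and_intros <;> (split_ifs <;> first | rfl | omega)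

lemma pv_cell_table (win : List (List Int) → Int → Int → Int → Int → Int)
    (m : List (List Int)) (r c i j : Int)
    (hi0 : 0 ≤ i) (hir : i < r) (hj0 : 0 ≤ j) (hjc : j < c) :
    pvCell (pvTable win m r c) i j = win m r c i j := by
  unfold pvCell pvTable
  rw [PySem.List.pyGetD_map_pyRange_of_nonneg _ _ _ _ hi0 hir,
      PySem.List.pyGetD_map_pyRange_of_nonneg _ _ _ _ hj0 hjc]

lemma pv_cell_eq (Mat1 Mat2 Mat3 : List (List Int)) (r c i j : Int)
    (h1r : (Mat1.length : Int) = r) (h2r : (Mat2.length : Int) = r) (h3r : (Mat3.length : Int) = r)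
    (h1c : ((PySem.List.pyGetD Mat1 0 []).length : Int) = c)
    (h2c : ((PySem.List.pyGetD Mat2 0 []).length : Int) = c)
    (h3c : ((PySem.List.pyGetD Mat3 0 []).length : Int) = c)
    (hi0 : 0 ≤ i) (hir : i < r) (hj0 : 0 ≤ j) (hjc : j < c) :
    getKeyPoint (get_3_cross3 Mat1 i j) (get_3_cross3 Mat2 i j) (get_3_cross3 Mat3 i j) (pvCell Mat2 i j)
    = (if pvCell Mat2 i j = max (max (pvWinMax Mat1 r c i j) (pvWinMax Mat2 r c i j)) (pvWinMax Mat3 r c i j)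
          ∨ pvCell Mat2 i j = min (min (pvWinMin Mat1 r c i j) (pvWinMin Mat2 r c i j)) (pvWinMin Mat3 r c i j)
        then pvCell Mat2 i j else 0) := by
  rw [pv_g3_eq Mat1 r c i j h1r h1c hi0 hir hj0 hjc,
      pv_g3_eq Mat2 r c i j h2r h2c hi0 hir hj0 hjc,
      pv_g3_eq Mat3 r c i j h3r h3c hi0 hir hj0 hjc]
  rw [pv_getKeyPoint_red, pv_max_comb, pv_min_comb]
  simp only [pvWinMax, pvWinMin]
  rfl

theorem calculate_keypoints_spec : Claim_equal_calculate_keypoints := by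
  unfold Claim_equal_calculate_keypoints Spec_calculate_keypoints
  intro Mat1 Mat2 Mat3 _dom hpre
  obtain ⟨hne, hcase⟩ := hpre
  simp only [calculate_keypoints, calculate_keypoints_alt]
  rcases hcase with h0 | ⟨h2, h3, _ha, hb, hc⟩
  · simp [h0, PySem.List.pyRange_one_eq_nil]
  · refine List.map_congr_left (fun i hi => ?_)
    refine List.map_congr_left (fun j hj => ?_)
    rw [PySem.List.mem_pyRange_one] at hi hj
    have hi0 : 0 ≤ i := hi.1
    have hir : i < (Mat1.length : Int) := hi.2
    have hj0 : 0 ≤ j := hj.1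
    have hjc : j < ((PySem.List.pyGetD Mat1 0 []).length : Int) := hj.2
    have hM2ne : Mat2 ≠ [] := by
      intro h; rw [h] at h2; simp at h2; exact hne (List.eq_nil_of_length_eq_zero h2.symm)
    have hM3ne : Mat3 ≠ [] := by
      intro h; rw [h] at h3; simp at h3; exact hne (List.eq_nil_of_length_eq_zero h3.symm)
    have hmem2 : PySem.List.pyGetD Mat2 0 [] ∈ Mat2 := by
      apply PySem.List.pyGetD_mem
      simp [PySem.Raise.InRange]
      omega
    have hmem3 : PySem.List.pyGetD Mat3 0 [] ∈ Mat3 := by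
      apply PySem.List.pyGetD_mem
      simp [PySem.Raise.InRange]
      omega
    have h2r : ((Mat2.length : Int)) = (Mat1.length : Int) := by exact_mod_cast h2
    have h3r : ((Mat3.length : Int)) = (Mat1.length : Int) := by exact_mod_cast h3
    have h2c : (((PySem.List.pyGetD Mat2 0 []).length : Int)) = ((PySem.List.pyGetD Mat1 0 []).length : Int) := by
      exact_mod_cast hb _ hmem2
    have h3c : (((PySem.List.pyGetD Mat3 0 []).length : Int)) = ((PySem.List.pyGetD Mat1 0 []).length : Int) := by
      exact_mod_cast hc _ hmem3
    rw [pv_cell_table pvWinMax Mat1 _ _ i j hi0 hir hj0 hjc,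
        pv_cell_table pvWinMax Mat2 _ _ i j hi0 hir hj0 hjc,
        pv_cell_table pvWinMax Mat3 _ _ i j hi0 hir hj0 hjc,
        pv_cell_table pvWinMin Mat1 _ _ i j hi0 hir hj0 hjc,
        pv_cell_table pvWinMin Mat2 _ _ i j hi0 hir hj0 hjc,
        pv_cell_table pvWinMin Mat3 _ _ i j hi0 hir hj0 hjc]
    exact pv_cell_eq Mat1 Mat2 Mat3 _ _ i j rfl h2r h3r rfl h2c h3c hi0 hir hj0 hjc
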